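-- pv_equiv track=rewrite | github.com/Djordje-Stojanovic/StockIQ | src/agents/historian_agent.py | _get_expertise_depth_config
-- ===== SOURCE A (Python) =====
-- def _get_expertise_depth_config(expertise_level: int) -> dict:
--     """Map expertise level to analysis depth configuration."""
--     depth_map = {
--         (1, 2): {
--             "depth_name": "Foundational",
--             "pages": "250-300",
--             "detail": "comprehensive with educational explanations",
--         },
--         (3, 4): {
--             "depth_name": "Educational",
--             "pages": "150-200",
--             "detail": "detailed with historical context",
--         },
--         (5, 6): {
--             "depth_name": "Intermediate",
--             "pages": "80-100",
--             "detail": "focused historical analysis",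
--         },
--         (7, 8): {
--             "depth_name": "Advanced",
--             "pages": "50-60",
--             "detail": "executive-level historical insights",
--         },
--         (9, 10): {
--             "depth_name": "Executive",
--             "pages": "10-20",
--             "detail": "historical summary with key implications",
--         },
--     }
--
--     for level_range, config in depth_map.items():
--         if level_range[0] <= expertise_level <= level_range[1]:
--             return config
--
--     return {
--         "depth_name": "Intermediate",
--         "pages": "80-100",
--         "detail": "focused historical analysis",
--     }
-- ===== SOURCE B (Python) =====
-- # (name, pages, detail) rows, ordered Foundational -> Executive
-- _ROWS = [
--     ("Foundational", "250-300", "comprehensive with educational explanations"),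
--     ("Educational", "150-200", "detailed with historical context"),
--     ("Intermediate", "80-100", "focused historical analysis"),
--     ("Advanced", "50-60", "executive-level historical insights"),
--     ("Executive", "10-20", "historical summary with key implications"),
-- ]
--
--
-- def _mk(row):
--     name, pages, detail = row
--     return {"depth_name": name, "pages": pages, "detail": detail}
--
--
-- def _get_expertise_depth_config(expertise_level: int) -> dict:
--     """Map expertise level to analysis depth configuration."""
--     idx = (expertise_level - 1) // 2 if 1 <= expertise_level <= 10 else 2
--     return _mk(_ROWS[idx])
-- ===== Notes on version B (the rewrite author's own statement) =====
-- stated objective: idiomatic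
-- what changed: Replaces the linear scan over a dict keyed by (lo,hi) ranges of full config dicts with direct arithmetic floor-division indexing into a table of (name,pages,detail) triples assembled into a dict by a constructor helper, falling back to the Intermediate row when the level is out of range.
import Mathlib
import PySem

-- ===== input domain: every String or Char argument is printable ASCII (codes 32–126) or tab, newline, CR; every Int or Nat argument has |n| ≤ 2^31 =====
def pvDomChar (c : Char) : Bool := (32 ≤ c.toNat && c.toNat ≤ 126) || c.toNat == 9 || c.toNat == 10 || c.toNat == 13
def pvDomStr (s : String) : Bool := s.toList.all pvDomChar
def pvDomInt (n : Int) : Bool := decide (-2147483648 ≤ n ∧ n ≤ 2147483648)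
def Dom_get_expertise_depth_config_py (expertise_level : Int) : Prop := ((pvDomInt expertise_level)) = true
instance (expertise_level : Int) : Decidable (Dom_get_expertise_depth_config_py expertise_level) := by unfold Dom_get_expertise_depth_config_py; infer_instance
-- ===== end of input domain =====

-- B replaces A's linear range-scan over full config dicts with arithmetic indexing into a table of (name,pages,detail) triples assembled by a constructor helper (idiomatic; same cost).


-- ===== PORT A =====
-- A's for-loop over depth_map.items() with early return
def pyA_scan (l : Int) : List ((Int × Int) × List (String × String)) → Option (List (String × String))
  | [] => none
  | ((a, b), c) :: rest => if a ≤ l ∧ l ≤ b then some c else pyA_scan l rest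

def get_expertise_depth_config_py (expertise_level : Int) : List (String × String) :=
  let depth_map : List ((Int × Int) × List (String × String)) :=
    [((1, 2), [("depth_name", "Foundational"), ("pages", "250-300"),
               ("detail", "comprehensive with educational explanations")]),
     ((3, 4), [("depth_name", "Educational"), ("pages", "150-200"),
               ("detail", "detailed with historical context")]),
     ((5, 6), [("depth_name", "Intermediate"), ("pages", "80-100"),
               ("detail", "focused historical analysis")]),
     ((7, 8), [("depth_name", "Advanced"), ("pages", "50-60"),
               ("detail", "executive-level historical insights")]),
     ((9, 10), [("depth_name", "Executive"), ("pages", "10-20"),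
                ("detail", "historical summary with key implications")])]
  match pyA_scan expertise_level depth_map with
  | some c => c
  | none => [("depth_name", "Intermediate"), ("pages", "80-100"),
             ("detail", "focused historical analysis")]

-- ===== PORT B =====
-- the (name, pages, detail) rows, Foundational -> Executive
def pvRows : List (String × String × String) :=
  [("Foundational", "250-300", "comprehensive with educational explanations"),
   ("Educational", "150-200", "detailed with historical context"),
   ("Intermediate", "80-100", "focused historical analysis"),
   ("Advanced", "50-60", "executive-level historical insights"),
   ("Executive", "10-20", "historical summary with key implications")]

-- constructor helper _mk: triple -> association-list dict
def pvMk (row : String × String × String) : List (String × String) :=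
  [("depth_name", row.1), ("pages", row.2.1), ("detail", row.2.2)]

def get_expertise_depth_config_py_alt (expertise_level : Int) : List (String × String) :=
  let idx : Int :=
    if 1 ≤ expertise_level ∧ expertise_level ≤ 10
    then PySem.Int.floordiv (expertise_level - 1) 2 else 2
  -- idx is always in range 0..4; getD only totalises the lookup
  pvMk ((PySem.List.pyGet? pvRows idx).getD ("Intermediate", "80-100", "focused historical analysis"))

-- ===== PRECONDITION & SPEC =====
def Spec_get_expertise_depth_config_py (expertise_level : Int) (out : List (String × String)) : Prop := out = get_expertise_depth_config_py_alt expertise_level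
instance (expertise_level : Int) (out : List (String × String)) : Decidable (Spec_get_expertise_depth_config_py expertise_level out) := by unfold Spec_get_expertise_depth_config_py; infer_instance

-- ===== CLAIM =====
def Claim_equal_get_expertise_depth_config_py : Prop := ∀ (expertise_level : Int), Dom_get_expertise_depth_config_py expertise_level → Spec_get_expertise_depth_config_py expertise_level (get_expertise_depth_config_py expertise_level)

-- ===== LEMMAS AND PROOFS =====

-- ===== VERDICT =====
theorem get_expertise_depth_config_py_spec : Claim_equal_get_expertise_depth_config_py := by
  intro l _
  unfold Spec_get_expertise_depth_config_py get_expertise_depth_config_py get_expertise_depth_config_py_alt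
  by_cases h : 1 ≤ l ∧ l ≤ 10
  · obtain ⟨h1, h2⟩ := h
    interval_cases l <;> decide
  · have h1 : ¬ (1 ≤ l ∧ l ≤ 2) := by omega
    have h2 : ¬ (3 ≤ l ∧ l ≤ 4) := by omega
    have h3 : ¬ (5 ≤ l ∧ l ≤ 6) := by omega
    have h4 : ¬ (7 ≤ l ∧ l ≤ 8) := by omega
    have h5 : ¬ (9 ≤ l ∧ l ≤ 10) := by omega
    simp [pyA_scan, h, h1, h2, h3, h4, h5, pvMk, pvRows, PySem.List.pyGet?, PySem.List.pyIdx?]
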